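-- pv_equiv track=rewrite | github.com/sonnyzxc/cospro_solutions | 1차/1차 1급 5_initial_code.py | solution
-- ===== SOURCE A (Python) =====
-- def solution(n):
--     # Write code here.
--     answer = 0
--     c = 0
--     for x in range(1, n*n + 1, n):
--         temp = [y for y in range(x, x + n)]
--         if c % 2 == 1:
--             answer += temp[len(temp) - 1 - c]
--         else:
--             answer += temp[c]
--         c += 1
--     return answer
-- ===== SOURCE B (Python) =====
-- def solution(n):
--     # Closed form per row: row c (0-based) contributes c*n+c+1 when c is even,
--     # and (c+1)*n-c when c is odd; no row list is materialised.
--     return sum(c * n + c + 1 if c % 2 == 0 else (c + 1) * n - c for c in range(n))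
-- ===== Notes on version B (the rewrite author's own statement) =====
-- stated objective: faster
-- what changed: B replaces A's construction of each n-element row list and indexing into it by a per-row closed-form term summed in a single pass over range(n).
-- outside the precondition, e.g. on solution(0): A raises ValueError, B returns 0
import Mathlib
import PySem

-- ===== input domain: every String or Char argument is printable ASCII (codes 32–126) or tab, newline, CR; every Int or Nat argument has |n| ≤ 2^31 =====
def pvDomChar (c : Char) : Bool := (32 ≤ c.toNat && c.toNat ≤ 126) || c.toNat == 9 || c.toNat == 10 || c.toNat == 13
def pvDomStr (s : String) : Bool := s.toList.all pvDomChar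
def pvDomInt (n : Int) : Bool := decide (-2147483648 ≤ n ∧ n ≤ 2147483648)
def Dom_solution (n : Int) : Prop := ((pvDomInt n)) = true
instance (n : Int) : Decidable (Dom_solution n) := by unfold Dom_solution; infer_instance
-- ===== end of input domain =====

-- B sums a closed-form term per row instead of building and indexing each row list.

-- ===== PORT A =====
-- loop state: (answer, c); temp[i] via pyGetD (the index is always in range when the loop body runs)
def solution (n : Int) : Int :=
  ((PySem.List.pyRange 1 (n*n + 1) n).foldl
    (fun (s : Int × Int) x =>
      let temp := PySem.List.pyRange x (x + n) 1
      (s.1 + (if PySem.Int.mod s.2 2 = 1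
              then PySem.List.pyGetD temp (PySem.List.len temp - 1 - s.2) 0
              else PySem.List.pyGetD temp s.2 0),
       s.2 + 1)) (0, 0)).1

-- ===== PORT B =====
def solution_alt (n : Int) : Int :=
  ((PySem.List.pyRange 0 n 1).map
    (fun c => if PySem.Int.mod c 2 = 0 then c*n + c + 1 else (c + 1)*n - c)).sum

-- ===== PRECONDITION & SPEC =====
-- A raises ValueError only at n = 0 (range step 0); that single input is excluded.
def Pre_solution (n : Int) : Prop := n ≠ 0
instance (n : Int) : Decidable (Pre_solution n) := by unfold Pre_solution; infer_instance
def pvWitness_solution : Int := 4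

def Spec_solution (n : Int) (out : Int) : Prop := out = solution_alt n
instance (n : Int) (out : Int) : Decidable (Spec_solution n out) := by unfold Spec_solution; infer_instance

-- ===== CLAIM (what is proved, stated in full; the proofs are below) =====
def Claim_equal_solution : Prop := ∀ (n : Int), Dom_solution n → Pre_solution n → Spec_solution n (solution n)

-- ===== LEMMAS AND PROOFS =====

-- the value A adds for row c = m (0 ≤ m < n) equals B's closed-form term
lemma solution_row (n : Int) (hn : 0 < n) (m : Nat) (hm : (m : Int) < n) :
    (let temp := PySem.List.pyRange (1 + n * m) (1 + n * m + n) 1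
     if PySem.Int.mod (m : Int) 2 = 1
     then PySem.List.pyGetD temp (PySem.List.len temp - 1 - (m : Int)) 0
     else PySem.List.pyGetD temp (m : Int) 0)
    = (if PySem.Int.mod (m : Int) 2 = 0 then (m : Int)*n + m + 1 else ((m : Int) + 1)*n - m) := by
  have h2 : PySem.Int.mod (m : Int) 2 = (m : Int) % 2 := PySem.Int.mod_eq_emod_of_pos (by norm_num)
  have hget : ∀ (k : Nat), k < n.toNat →
      PySem.List.pyGetD (PySem.List.pyRange (1 + n * m) (1 + n * m + n) 1) (k : Int) 0
        = 1 + n * m + k := by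
    intro k hk
    rw [PySem.List.pyGetD_natCast, List.getD_eq_getElem?_getD, PySem.List.getElem?_pyRange_one]
    have hk' : (k : Int) < n := by omega
    simp [hk']
  simp only [PySem.List.len_eq, PySem.List.length_pyRange_one, h2]
  rcases Int.emod_two_eq_zero_or_one (m : Int) with h | h
  · rw [h, if_neg (by decide), if_pos rfl, hget m (by omega)]; ring
  · rw [h, if_pos rfl, if_neg (by decide)]
    have hidx : ((1 + n * (m:Int) + n - (1 + n * m)).toNat : Int) - 1 - (m : Int)
        = ((n.toNat - 1 - m : Nat) : Int) := by omega
    rw [hidx, hget (n.toNat - 1 - m) (by omega)]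
    have : ((n.toNat - 1 - m : Nat) : Int) = n - 1 - m := by omega
    rw [this]; ring

-- A's loop over the first m rows: its state is (partial sum of B's terms, m)
lemma solution_loop (n : Int) (hn : 0 < n) (m : Nat) (hm : (m : Int) ≤ n) :
    ((List.range m).map (fun (k : Nat) => (1 : Int) + n * (k : Int))).foldl
      (fun (s : Int × Int) x =>
        let temp := PySem.List.pyRange x (x + n) 1
        (s.1 + (if PySem.Int.mod s.2 2 = 1
                then PySem.List.pyGetD temp (PySem.List.len temp - 1 - s.2) 0
                else PySem.List.pyGetD temp s.2 0),
         s.2 + 1)) (0, 0)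
    = (((List.range m).map (fun (k : Nat) =>
          if PySem.Int.mod (k : Int) 2 = 0 then (k : Int)*n + k + 1 else ((k : Int) + 1)*n - k)).sum,
       (m : Int)) := by
  induction m with
  | zero => simp
  | succ j ih =>
    rw [List.range_succ, List.map_append, List.foldl_append, ih (by push_cast at hm ⊢; omega),
        List.map_append, List.sum_append]
    simp only [List.map_cons, List.map_nil, List.foldl_cons, List.foldl_nil, List.sum_cons,
      List.sum_nil]
    have hrow := solution_row n hn j (by push_cast at hm ⊢; omega)
    simp only at hrow
    rw [hrow, Prod.mk.injEq]
    exact ⟨by ring, by push_cast; ring⟩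

-- ===== VERDICT (by name: the statement is the Claim_ definition above) =====
theorem solution_spec : Claim_equal_solution := by
  intro n _ hn
  unfold Spec_solution
  rcases lt_or_gt_of_ne hn with h | h
  · have h0 : ¬ (n*n+1 < 1) := by nlinarith
    unfold solution solution_alt
    rw [PySem.List.pyRange_one_eq_nil (by omega)]
    simp [PySem.List.pyRange, h.ne, not_lt.2 h.le, h0]
  · unfold solution solution_alt
    have hcount : ((n*n + 1 - 1 + n - 1)/n).toNat = n.toNat := by
      have h1 : n*n + 1 - 1 + n - 1 = (n-1) + n*n := by ring
      rw [h1, Int.add_mul_ediv_right _ _ h.ne', Int.ediv_eq_zero_of_lt (by omega) (by omega)]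
      omega
    rw [PySem.List.pyRange_of_pos 1 (n*n+1) h, if_pos (by nlinarith), hcount,
        PySem.List.pyRange_one]
    rw [solution_loop n h n.toNat (by omega), List.map_map]
    simp only [show n - 0 = n from by ring]
    congr 1
    refine List.map_congr_left fun k _ => ?_
    simp [Function.comp]
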